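-- pv_equiv track=rewrite | github.com/Ezic04/regex_compiler | src/common/lexer_utils.py | scan_quoted_ident
-- ===== SOURCE A (Python) =====
-- from typing import Iterator, Callable, Type, Tuple
--
-- class LexerError(Exception):
--     pass
--
-- def is_valid_ident_char(c: str) -> bool:
--     return c.isalnum() or c == '_' or c == '-'
--
-- def scan_quoted_ident(src: str, i: int) -> Tuple[str, int]:
--     i += 1
--     start = i
--     while i < len(src) and src[i] != '\'':
--         if not is_valid_ident_char(src[i]):
--             raise LexerError(
--                 f"Invalid character {src[i]!r} in identifier at position {i}")
--         i += 1
--     if i >= len(src):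
--         raise LexerError("Unterminated quoted identifier")
--     return src[start:i], i
-- ===== SOURCE B (Python) =====
-- class LexerError(Exception):
--     pass
--
-- def is_valid_ident_char(c: str) -> bool:
--     return c.isalnum() or c == '_' or c == '-'
--
-- def scan_quoted_ident(src, i):
--     # find-then-validate: locate the closing quote first, then validate the span
--     start = i + 1
--     q = src.find("'", start)
--     end = q if q != -1 else len(src)
--     for j in range(start, end):
--         c = src[j]
--         if not is_valid_ident_char(c):
--             raise LexerError(
--                 f"Invalid character {c!r} in identifier at position {j}")
--     if q == -1:
--         raise LexerError("Unterminated quoted identifier")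
--     return src[start:q], q
-- ===== Notes on version B (the rewrite author's own statement) =====
-- stated objective: alternative
-- what changed: A interleaves quote-search and character validation in one while loop; B first locates the closing quote with src.find, then validates the delimited span with a separate range loop (find-then-validate decomposition).
-- outside the precondition, e.g. on scan_quoted_ident("a'", -3): A returns ('a', -1), B raises LexerError
import Mathlib
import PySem

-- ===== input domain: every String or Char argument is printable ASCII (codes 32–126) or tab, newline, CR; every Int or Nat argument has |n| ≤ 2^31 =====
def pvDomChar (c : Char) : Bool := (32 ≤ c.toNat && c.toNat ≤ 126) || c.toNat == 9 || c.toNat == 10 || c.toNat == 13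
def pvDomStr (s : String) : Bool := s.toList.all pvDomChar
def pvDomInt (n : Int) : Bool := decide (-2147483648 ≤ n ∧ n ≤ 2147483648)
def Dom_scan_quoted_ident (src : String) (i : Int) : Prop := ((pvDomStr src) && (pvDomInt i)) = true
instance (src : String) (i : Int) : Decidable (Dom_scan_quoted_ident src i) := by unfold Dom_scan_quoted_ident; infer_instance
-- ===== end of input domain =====

-- B replaces A's interleaved search+validate while-loop by a find-then-validate decomposition
-- (locate the closing quote with str.find, then validate the delimited span); same cost, different structure.
-- Where the Python raises (LexerError / IndexError) both ports return ("", -1); those inputs lie outside Pre_.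

-- shared module helper is_valid_ident_char (used by both Pythons)
def pvValid (c : Char) : Bool := PySem.Chars.isalnum c || c == '_' || c == '-'

-- ===== PORT A =====
-- A's while loop: some j = exit index (quote, or past-end), none = raise (invalid char / IndexError)
def pvScanA (src : List Char) (i : Int) : Option Int :=
  if _h : i < (src.length : Int) then
    match PySem.List.pyGet? src i with
    | none => none
    | some c =>
      if c = '\'' then some i
      else if pvValid c then pvScanA src (i + 1)
      else none
  else some i
termination_by ((src.length : Int) - i).toNat
decreasing_by omega

def scan_quoted_ident (src : String) (i : Int) : String × Int :=
  let i1 := i + 1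
  let start := i1
  match pvScanA src.toList i1 with
  | none => ("", -1)                                   -- raise LexerError: invalid character
  | some j =>
    if (src.toList.length : Int) ≤ j then ("", -1)     -- raise LexerError: unterminated
    else (PySem.Str.slice src (some start) (some j), j)

-- ===== PORT B =====
-- Source B's validation loop: first j in range(start, end) whose src[j] is invalid (none-lookup = IndexError also raises)
def pvFirstBad (src : List Char) (js : List Int) : Option Int :=
  js.find? (fun j =>
    match PySem.List.pyGet? src j with
    | none => true
    | some c => !pvValid c)

def scan_quoted_ident_alt (src : String) (i : Int) : String × Int :=
  let start := i + 1
  let q := PySem.Str.findFrom src "'" start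
  let e := if q ≠ -1 then q else (PySem.Str.len src : Int)
  match pvFirstBad src.toList (PySem.List.pyRange start e 1) with
  | some _ => ("", -1)                                 -- raise LexerError: invalid character
  | none =>
    if q = -1 then ("", -1)                            -- raise LexerError: unterminated
    else (PySem.Str.slice src (some start) (some q), q)

-- ===== PRECONDITION & SPEC =====
-- Pre_ excludes the inputs where A raises (invalid character, unterminated identifier, IndexError) and the
-- inputs with i < -1, where any value A returns is an accident of Python's negative-index wraparound and
-- B's find-then-validate naturally raises a LexerError instead.
def Pre_scan_quoted_ident (src : String) (i : Int) : Prop :=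
  -1 ≤ i ∧ ((src.toList.drop (i + 1).toNat).dropWhile pvValid).head? = some '\''
instance (src : String) (i : Int) : Decidable (Pre_scan_quoted_ident src i) := by
  unfold Pre_scan_quoted_ident; infer_instance

def pvWitness_scan_quoted_ident : String × Int := ("'ab'", 0)

def Spec_scan_quoted_ident (src : String) (i : Int) (out : String × Int) : Prop := out = scan_quoted_ident_alt src i
instance (src : String) (i : Int) (out : String × Int) : Decidable (Spec_scan_quoted_ident src i out) := by unfold Spec_scan_quoted_ident; infer_instance

-- ===== CLAIM (what is proved, stated in full; the proofs are below) =====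
def Claim_equal_scan_quoted_ident : Prop := ∀ (src : String) (i : Int), Dom_scan_quoted_ident src i → Pre_scan_quoted_ident src i → Spec_scan_quoted_ident src i (scan_quoted_ident src i)

-- ===== LEMMAS AND PROOFS =====

theorem pvValid_quote_false : pvValid '\'' = false := by decide

-- a singleton pattern is a prefix exactly when it is the head
theorem pvPfxSingleton (l : List Char) (c : Char) : [c] <+: l ↔ l.head? = some c := by
  constructor
  · rintro ⟨t, ht⟩; rw [← ht]; rfl
  · intro h; cases l with
    | nil => simp at h
    | cons a t => simp at h; exact ⟨t, by simp [h]⟩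

-- A's loop reaches the first quote when every char before it is valid
theorem pvScanA_eq (s : List Char) (m : Nat) (hm : m < s.length) (hq : s[m] = '\'')
    (n : Nat) (hn : n ≤ m) (hv : ∀ j (hj : j < s.length), n ≤ j → j < m → pvValid s[j] = true) :
    pvScanA s (n : Int) = some (m : Int) := by
  have hns : n < s.length := Nat.lt_of_le_of_lt hn hm
  have hnlt : (n : Int) < (s.length : Int) := by exact_mod_cast hns
  rw [pvScanA, dif_pos hnlt, PySem.List.pyGet?_natCast, List.getElem?_eq_getElem hns]
  simp only
  by_cases he : n = m
  · subst he; simp [hq]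
  · have hlt : n < m := lt_of_le_of_ne hn he
    have hvn : pvValid s[n] = true := hv n hns le_rfl hlt
    have hne : ¬ s[n] = '\'' := by
      intro h; rw [h, pvValid_quote_false] at hvn; exact absurd hvn (by simp)
    rw [if_neg hne, if_pos hvn]
    have hcast : ((n : Int) + 1) = ((n + 1 : Nat) : Int) := by push_cast; ring
    rw [hcast]
    exact pvScanA_eq s m hm hq (n + 1) hlt (fun j hj h1 h2 => hv j hj (by omega) h2)
termination_by m - n
decreasing_by omega

theorem scan_quoted_ident_spec : Claim_equal_scan_quoted_ident := by
  intro src i _hdom hpre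
  obtain ⟨hi, hhead⟩ := hpre
  unfold Spec_scan_quoted_ident
  set s := src.toList with hs
  set n0 : Nat := (i + 1).toNat with hn0
  have hi1 : i + 1 = (n0 : Int) := by omega
  set pre := (s.drop n0).takeWhile pvValid with hpredef
  set m : Nat := n0 + pre.length with hmdef
  -- structure of s.drop n0
  have hsplit : pre ++ (s.drop n0).dropWhile pvValid = s.drop n0 := List.takeWhile_append_dropWhile
  obtain ⟨tl, htl⟩ : ∃ tl, (s.drop n0).dropWhile pvValid = '\'' :: tl := by
    cases hdw : (s.drop n0).dropWhile pvValid with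
    | nil => rw [hdw] at hhead; simp at hhead
    | cons a t => rw [hdw] at hhead; simp at hhead; exact ⟨t, by rw [hhead]⟩
  have hdropn0 : s.drop n0 = pre ++ '\'' :: tl := by rw [← hsplit, htl]
  have hlendrop : (s.drop n0).length = pre.length + 1 + tl.length := by
    rw [hdropn0]; simp; omega
  have hn0len : n0 < s.length := by
    have := List.length_drop (l := s) (i := n0); omega
  have hmlt : m < s.length := by
    have := List.length_drop (l := s) (i := n0); omega
  have hsm : s[m]'hmlt = '\'' := by
    have h1 : (s.drop n0)[pre.length]? = some '\'' := by
      rw [hdropn0, List.getElem?_append_right le_rfl]; simp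
    rw [List.getElem?_drop] at h1
    rw [List.getElem?_eq_getElem hmlt] at h1
    exact Option.some_injective _ h1
  have hvalid : ∀ j (hj : j < s.length), n0 ≤ j → j < m → pvValid (s[j]'hj) = true := by
    intro j hj h1 h2
    have hk : j - n0 < pre.length := by omega
    have hpfx : pre <+: s.drop n0 := List.takeWhile_prefix _
    have h3 : (s.drop n0)[j - n0]'(by omega) = pre[j - n0]'hk :=
      Eq.symm (List.IsPrefix.getElem hpfx hk)
    have h4 : s[j]'hj = (s.drop n0)[j - n0]'(by omega) := by
      rw [List.getElem_drop]; congr 1; omega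
    rw [h4, h3]
    exact List.mem_takeWhile_imp (List.getElem_mem hk)
  -- A side
  have hA : pvScanA s (n0 : Int) = some (m : Int) :=
    pvScanA_eq s m hmlt hsm n0 (by omega) hvalid
  -- B side: findFrom finds exactly m
  have hq : PySem.Chars.findFrom s ('\'' :: []) ((n0 : Int)) none = (m : Int) := by
    have hk : n0 ≤ s.length := le_of_lt hn0len
    have hinfix : ['\''] <:+: s.drop n0 := by
      refine (PySem.Chars.isIn_iff_infix _ _).mp ?_
      refine (PySem.Chars.exists_prefix_drop_iff_isIn _ _).mp ?_
      exact ⟨pre.length, by rw [hdropn0, List.drop_left]; exact ⟨tl, rfl⟩⟩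
    have hne : ¬ (PySem.Chars.findFrom s ['\''] (n0 : Int) none = -1) := by
      rw [PySem.Chars.findFrom_natCast_eq_neg_one_iff s _ n0 hk]
      simpa using hinfix
    obtain ⟨hle, hpf, hmin⟩ := PySem.Chars.findFrom_natCast_spec s ['\''] n0 hk hne
    set r := PySem.Chars.findFrom s ['\''] (n0 : Int) none with hr
    have hr0 : 0 ≤ r := le_trans (by exact_mod_cast Nat.zero_le n0) hle
    -- r.toNat ≤ m : the prefix at m plus minimality
    have hpm : ['\''] <+: s.drop m := by
      rw [pvPfxSingleton]
      rw [List.head?_eq_getElem?, List.getElem?_drop]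
      have : m + 0 = m := by omega
      rw [this, List.getElem?_eq_getElem hmlt, hsm]
    have hrle : r.toNat ≤ m := by
      by_contra hgt
      exact hmin m (by omega) (by omega) hpm
    -- m ≤ r.toNat : chars before m are valid, hence not quotes
    have hrge : m ≤ r.toNat := by
      by_contra hgt
      have hgt : r.toNat < m := by omega
      have hrlt : r.toNat < s.length := by omega
      have hquote : s[r.toNat]'hrlt = '\'' := by
        rw [pvPfxSingleton, List.head?_eq_getElem?, List.getElem?_drop] at hpf
        have : r.toNat + 0 = r.toNat := by omega
        rw [this, List.getElem?_eq_getElem hrlt] at hpf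
        exact Option.some_injective _ hpf
      have hv := hvalid r.toNat hrlt (by omega) hgt
      rw [hquote, pvValid_quote_false] at hv
      exact absurd hv (by simp)
    have : r.toNat = m := le_antisymm hrle hrge
    omega
  -- assemble
  have hqstr : PySem.Str.findFrom src "'" ((n0 : Int)) = (m : Int) := by
    simpa using hq
  have hmne : ((m : Int) ≠ -1) := by omega
  have hmlen : ¬ ((s.length : Int) ≤ (m : Int)) := by exact_mod_cast Nat.not_le.mpr hmlt
  have hnone : pvFirstBad s (PySem.List.pyRange (n0 : Int) (m : Int) 1) = none := by
    unfold pvFirstBad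
    rw [List.find?_eq_none]
    intro j hj
    rw [PySem.List.mem_pyRange_one] at hj
    obtain ⟨hj1, hj2⟩ := hj
    have hjn : j = ((j.toNat : Nat) : Int) := by omega
    have hjlt : j.toNat < s.length := by omega
    rw [hjn, PySem.List.pyGet?_natCast, List.getElem?_eq_getElem hjlt]
    simp only
    have := hvalid j.toNat hjlt (by omega) (by omega)
    simp [this]
  have hE : (if (m : Int) ≠ -1 then (m : Int) else (PySem.Str.len src : Int)) = (m : Int) := if_pos hmne
  unfold scan_quoted_ident scan_quoted_ident_alt
  simp only [← hs, hi1, hA, hqstr, hE, hnone, if_neg hmlen, if_neg hmne]
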